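-- pv_equiv track=rewrite | github.com/d9d-project/d9d | d9d/module/block/embedding/shard_token_embedding.py | _build_token_start_end_indices
-- ===== SOURCE A (Python) =====
-- from typing import Sequence
--
-- def _build_token_start_end_indices(
--         split_vocab_size: dict[str, int], split_order: Sequence[str]
-- ) -> tuple[dict[str, int], dict[str, int]]:
--     offset = 0
--     starts = {}
--     ends = {}
--     for split in split_order:
--         current_size = split_vocab_size[split]
--
--         starts[split] = offset
--         ends[split] = offset + current_size
--
--         offset += current_size
--     return starts, ends
-- ===== SOURCE B (Python) =====
-- def _build_token_start_end_indices(split_vocab_size, split_order):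
--     # Table-first: one pass builds the boundary table, then two independent
--     # zip passes build the dicts.
--     sizes = [split_vocab_size[s] for s in split_order]
--     offsets = [0]
--     for sz in sizes:
--         offsets.append(offsets[-1] + sz)
--     starts = dict(zip(split_order, offsets))
--     ends = dict(zip(split_order, offsets[1:]))
--     return starts, ends
-- ===== Notes on version B (the rewrite author's own statement) =====
-- stated objective: alternative
-- what changed: Replaces the single fused loop that interleaves offset accumulation with dict insertion by a prefix-sum boundary table built first, then two independent dict(zip(...)) passes reading adjacent table entries.
import Mathlib
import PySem

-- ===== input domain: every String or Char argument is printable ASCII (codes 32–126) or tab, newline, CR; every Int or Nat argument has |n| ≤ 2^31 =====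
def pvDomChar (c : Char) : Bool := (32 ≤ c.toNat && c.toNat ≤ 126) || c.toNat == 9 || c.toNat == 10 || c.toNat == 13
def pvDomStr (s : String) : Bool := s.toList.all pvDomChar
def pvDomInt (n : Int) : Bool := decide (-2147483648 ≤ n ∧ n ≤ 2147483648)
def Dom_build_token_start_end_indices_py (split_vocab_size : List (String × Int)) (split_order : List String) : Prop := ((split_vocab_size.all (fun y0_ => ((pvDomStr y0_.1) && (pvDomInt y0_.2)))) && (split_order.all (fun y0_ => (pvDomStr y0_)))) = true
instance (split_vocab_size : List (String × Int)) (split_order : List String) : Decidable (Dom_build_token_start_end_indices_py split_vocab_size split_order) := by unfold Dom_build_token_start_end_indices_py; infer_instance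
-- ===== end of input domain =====

-- B replaces A's single fused accumulator loop by a boundary table built first, then two independent dict(zip) passes (alternative decomposition, same cost).

-- ===== PORT A =====
def build_token_start_end_indices_py (split_vocab_size : List (String × Int)) (split_order : List String) : (List (String × Int)) × (List (String × Int)) :=
  let d : PySem.Dict String Int := PySem.Dict.mk split_vocab_size
  let r := split_order.foldl
    (fun (st : Int × PySem.Dict String Int × PySem.Dict String Int) split =>
      -- split_vocab_size[split]: a missing key raises KeyError, excluded by Pre_; the default 0 is never reached inside Pre_
      let current_size := (d.get? split).getD 0
      (st.1 + current_size, st.2.1.insert split st.1, st.2.2.insert split (st.1 + current_size)))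
    (0, PySem.Dict.mk [], PySem.Dict.mk [])
  (r.2.1.items, r.2.2.items)

-- ===== PORT B =====
-- the offsets loop of Source B: the running value is offsets[-1]
def pvOffsets : Int → List Int → List Int
  | off, [] => [off]
  | off, sz :: rest => off :: pvOffsets (off + sz) rest

def build_token_start_end_indices_py_alt (split_vocab_size : List (String × Int)) (split_order : List String) : (List (String × Int)) × (List (String × Int)) :=
  let d : PySem.Dict String Int := PySem.Dict.mk split_vocab_size
  let sizes := split_order.map (fun s => (d.get? s).getD 0)   -- KeyError excluded by Pre_
  let offsets := pvOffsets 0 sizes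
  let starts := PySem.Dict.ofList (split_order.zip offsets)
  let ends := PySem.Dict.ofList (split_order.zip (offsets.drop 1))
  (starts.items, ends.items)

-- ===== PRECONDITION & SPEC =====
-- Pre_ excludes split_order entries missing from split_vocab_size: there Python's A raises KeyError (B raises too).
def Pre_build_token_start_end_indices_py (split_vocab_size : List (String × Int)) (split_order : List String) : Prop :=
  ∀ s ∈ split_order, s ∈ split_vocab_size.map Prod.fst
instance (split_vocab_size : List (String × Int)) (split_order : List String) : Decidable (Pre_build_token_start_end_indices_py split_vocab_size split_order) := by unfold Pre_build_token_start_end_indices_py; infer_instance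
def pvWitness_build_token_start_end_indices_py : (List (String × Int)) × List String := ([("train", 3), ("valid", 2)], ["train", "valid"])
def Spec_build_token_start_end_indices_py (split_vocab_size : List (String × Int)) (split_order : List String) (out : (List (String × Int)) × (List (String × Int))) : Prop := out = build_token_start_end_indices_py_alt split_vocab_size split_order
instance (split_vocab_size : List (String × Int)) (split_order : List String) (out : (List (String × Int)) × (List (String × Int))) : Decidable (Spec_build_token_start_end_indices_py split_vocab_size split_order out) := by unfold Spec_build_token_start_end_indices_py; infer_instance

-- ===== CLAIM (what is proved, stated in full; the proofs are below) =====
def Claim_equal_build_token_start_end_indices_py : Prop := ∀ (split_vocab_size : List (String × Int)) (split_order : List String), Dom_build_token_start_end_indices_py split_vocab_size split_order → Pre_build_token_start_end_indices_py split_vocab_size split_order → Spec_build_token_start_end_indices_py split_vocab_size split_order (build_token_start_end_indices_py split_vocab_size split_order)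

-- ===== LEMMAS AND PROOFS =====
lemma pvOffsets_eq_cons (off : Int) (l : List Int) : pvOffsets off l = off :: (pvOffsets off l).drop 1 := by
  cases l <;> simp [pvOffsets]

-- A's fused loop, started at any state, equals the two zip-folds over the boundary table
lemma pv_main (d : PySem.Dict String Int) (order : List String) :
    ∀ (off : Int) (S E : PySem.Dict String Int),
      (order.foldl
        (fun (st : Int × PySem.Dict String Int × PySem.Dict String Int) split =>
          let cs := (d.get? split).getD 0
          (st.1 + cs, st.2.1.insert split st.1, st.2.2.insert split (st.1 + cs)))
        (off, S, E)).2 =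
      ((order.zip (pvOffsets off (order.map (fun s => (d.get? s).getD 0)))).foldl
        (fun acc p => acc.insert p.1 p.2) S,
       (order.zip ((pvOffsets off (order.map (fun s => (d.get? s).getD 0))).drop 1)).foldl
        (fun acc p => acc.insert p.1 p.2) E) := by
  induction order with
  | nil => intro off S E; simp [pvOffsets]
  | cons s rest ih =>
    intro off S E
    simp only [List.foldl_cons, List.map_cons, pvOffsets, List.zip_cons_cons,
      List.drop_succ_cons, List.drop_zero]
    rw [ih]
    congr 1
    conv_rhs => rw [pvOffsets_eq_cons (off + (d.get? s).getD 0) (rest.map (fun s => (d.get? s).getD 0))]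
    simp

lemma ofList_eq_foldl (l : List (String × Int)) :
    PySem.Dict.ofList l = l.foldl (fun acc p => acc.insert p.1 p.2) (PySem.Dict.mk []) := by
  rfl

-- ===== VERDICT (by name: the statement is the Claim_ definition above) =====
theorem build_token_start_end_indices_py_spec : Claim_equal_build_token_start_end_indices_py := by
  intro svs order _ _
  unfold Spec_build_token_start_end_indices_py
  unfold build_token_start_end_indices_py build_token_start_end_indices_py_alt
  simp only [ofList_eq_foldl]
  have h := pv_main (PySem.Dict.mk svs) order 0 (PySem.Dict.mk []) (PySem.Dict.mk [])
  simp only at h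
  rw [Prod.ext_iff] at h
  rw [h.1, h.2]
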